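-- pv_equiv track=rewrite | github.com/jgfranco/formation | 2023_12/dominoesFinalState.py | determineForces
-- ===== SOURCE A (Python) =====
-- def determineForces(direction, dominoes, forces):
--   force = 0
--   for i in range(len(dominoes)):
--     domino = dominoes[i]
--     if domino == direction:
--       force = len(dominoes) + 1
--     elif domino != direction and domino != '.':
--       force = 0
--     elif force != 0:
--       force -=1
--
--     forces[i] += force if direction == "R" else -force
--
--   return forces
-- ===== SOURCE B (Python) =====
-- def determineForces(direction, dominoes, forces):
--     # Return-value and in-place mutation both match A on the stated domain.
--     n = len(dominoes)
--     sign = 1 if direction == "R" else -1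
--     sources = [i for i, c in enumerate(dominoes) if c == direction]
--     for i in sources:
--         force = n + 1
--         forces[i] += sign * force
--         j = i + 1
--         # propagate through free '.' cells (a '.' that is itself a source stops the walk)
--         while j < n and dominoes[j] == '.' and dominoes[j] != direction:
--             force -= 1
--             forces[j] += sign * force
--             j += 1
--     return forces
-- ===== Notes on version B (the rewrite author's own statement) =====
-- stated objective: alternative
-- what changed: Instead of one linear scan carrying a decaying force counter through every cell, B collects the push-source indices and, per source, walks forward assigning signed decreasing forces until the first non-free cell, leaving all other positions untouched.
import Mathlib
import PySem

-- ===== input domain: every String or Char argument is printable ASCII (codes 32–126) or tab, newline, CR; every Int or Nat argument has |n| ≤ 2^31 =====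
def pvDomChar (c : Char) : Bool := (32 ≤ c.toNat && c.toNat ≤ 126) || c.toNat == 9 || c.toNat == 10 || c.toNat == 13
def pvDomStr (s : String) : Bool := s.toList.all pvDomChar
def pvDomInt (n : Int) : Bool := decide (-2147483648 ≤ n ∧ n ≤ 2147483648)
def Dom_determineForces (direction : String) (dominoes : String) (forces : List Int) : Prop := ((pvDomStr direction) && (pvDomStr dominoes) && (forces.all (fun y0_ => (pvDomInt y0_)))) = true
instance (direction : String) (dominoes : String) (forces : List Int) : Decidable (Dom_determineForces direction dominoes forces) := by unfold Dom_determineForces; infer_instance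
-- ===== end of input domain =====

-- B differs from A structurally (per-source walks vs one scan with a force accumulator);
-- both mutate `forces` in place in Python and the equivalence is about the returned list
-- (which is the same mutated list in both).

-- ===== PORT A =====
-- the for-loop of A, as structural recursion over the index i with state (force, forces)
def loopA (direction : String) (ds : List Char) (i : Nat) (force : Int) (fs : List Int) : List Int :=
  if h : i < ds.length then
    let domino := ds.getD i ' '
    let force' : Int :=
      if String.mk [domino] = direction then (ds.length : Int) + 1
      else if String.mk [domino] ≠ direction ∧ domino ≠ '.' then 0
      else if force ≠ 0 then force - 1
      else force
    loopA direction ds (i + 1) force'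
      (fs.set i (fs.getD i 0 + (if direction = "R" then force' else -force')))
  else fs
termination_by ds.length - i

def determineForces (direction : String) (dominoes : String) (forces : List Int) : List Int :=
  loopA direction dominoes.toList 0 0 forces

-- ===== PORT B =====
-- the inner while-loop of B: walk forward through free '.' cells assigning decreasing forces
def walkB (direction : String) (ds : List Char) (sign : Int) (j : Nat) (force : Int) (fs : List Int) : List Int :=
  if h : j < ds.length ∧ ds.getD j ' ' = '.' ∧ String.mk [ds.getD j ' '] ≠ direction then
    walkB direction ds sign (j + 1) (force - 1)
      (fs.set j (fs.getD j 0 + sign * (force - 1)))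
  else fs
termination_by ds.length - j

-- the body of B's for-loop over one source index i
def stepB (direction : String) (ds : List Char) (sign : Int) (fs : List Int) (i : Nat) : List Int :=
  walkB direction ds sign (i + 1) ((ds.length : Int) + 1)
    (fs.set i (fs.getD i 0 + sign * ((ds.length : Int) + 1)))

def determineForces_alt (direction : String) (dominoes : String) (forces : List Int) : List Int :=
  let ds := dominoes.toList
  let sign : Int := if direction = "R" then 1 else -1
  let sources := (List.range ds.length).filter (fun i => String.mk [ds.getD i ' '] == direction)
  sources.foldl (stepB direction ds sign) forces

-- ===== PRECONDITION & SPEC =====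
-- Pre_ excludes exactly the inputs where A raises IndexError: forces shorter than dominoes.
def Pre_determineForces (direction : String) (dominoes : String) (forces : List Int) : Prop :=
  dominoes.toList.length ≤ forces.length
instance (direction : String) (dominoes : String) (forces : List Int) : Decidable (Pre_determineForces direction dominoes forces) := by unfold Pre_determineForces; infer_instance
def pvWitness_determineForces : String × String × List Int := ("R", "R..L.", [0, 0, 0, 0, 0])

def Spec_determineForces (direction : String) (dominoes : String) (forces : List Int) (out : List Int) : Prop := out = determineForces_alt direction dominoes forces
instance (direction : String) (dominoes : String) (forces : List Int) (out : List Int) : Decidable (Spec_determineForces direction dominoes forces out) := by unfold Spec_determineForces; infer_instance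

-- ===== CLAIM (what is proved, stated in full; the proofs are below) =====
def Claim_equal_determineForces : Prop := ∀ (direction : String) (dominoes : String) (forces : List Int), Dom_determineForces direction dominoes forces → Pre_determineForces direction dominoes forces → Spec_determineForces direction dominoes forces (determineForces direction dominoes forces)

-- ===== LEMMAS AND PROOFS =====

-- the sources of B restricted to indices ≥ j
def srcs (direction : String) (ds : List Char) (j : Nat) : List Nat :=
  (List.range' j (ds.length - j)).filter (fun i => String.mk [ds.getD i ' '] == direction)

lemma srcs_zero (direction : String) (ds : List Char) :
    srcs direction ds 0 =
      (List.range ds.length).filter (fun i => String.mk [ds.getD i ' '] == direction) := by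
  simp [srcs, List.range_eq_range']

lemma srcs_cons (direction : String) (ds : List Char) (j : Nat) (hj : j < ds.length) :
    srcs direction ds j =
      if String.mk [ds.getD j ' '] = direction then j :: srcs direction ds (j + 1)
      else srcs direction ds (j + 1) := by
  have h : ds.length - j = (ds.length - (j + 1)) + 1 := by omega
  rw [srcs, h, List.range'_succ, List.filter_cons]
  by_cases hd : String.mk [ds.getD j ' '] = direction <;> simp [hd, srcs]

lemma srcs_nil (direction : String) (ds : List Char) (j : Nat) (hj : ds.length ≤ j) :
    srcs direction ds j = [] := by
  have h : ds.length - j = 0 := by omega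
  simp [srcs, h]

lemma set_getD_self (fs : List Int) (j : Nat) (hj : j < fs.length) :
    fs.set j (fs.getD j 0 + 0) = fs := by
  rw [List.getD_eq_getElem fs 0 hj]
  simp

lemma delta_eq_sign_mul (direction : String) (x : Int) :
    (if direction = "R" then x else -x) = (if direction = "R" then (1 : Int) else -1) * x := by
  by_cases h : direction = "R" <;> simp [h]

-- Main invariant: A's scan from index j with force f equals B's remaining per-source walks,
-- provided f is 0 (dormant) or large enough never to self-expire before the string ends.
lemma loopA_eq_fold (direction : String) (ds : List Char) :
    ∀ (k j : Nat) (f : Int) (fs : List Int),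
      ds.length - j ≤ k → ds.length ≤ fs.length →
      (f = 0 ∨ (ds.length : Int) - j < f) →
      loopA direction ds j f fs =
        (srcs direction ds j).foldl
          (stepB direction ds (if direction = "R" then 1 else -1))
          (if f = 0 then fs else walkB direction ds (if direction = "R" then 1 else -1) j f fs) := by
  intro k
  induction k with
  | zero =>
    intro j f fs hk hlen hf
    have hj : ¬ j < ds.length := by omega
    rw [loopA, srcs_nil direction ds j (by omega)]
    by_cases h0 : f = 0
    · simp [hj, h0]
    · rw [walkB]
      have hno : ¬ (j < ds.length ∧ ds.getD j ' ' = '.' ∧ String.mk [ds.getD j ' '] ≠ direction) := by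
        rintro ⟨h1, _, _⟩; exact hj h1
      simp [hj, hno, h0]
  | succ k ih =>
    intro j f fs hk hlen hf
    by_cases hj : j < ds.length
    case neg =>
      exact ih j f fs (by omega) hlen hf
    case pos =>
      rw [loopA]
      simp only [dif_pos hj]
      by_cases hsrc : String.mk [ds.getD j ' '] = direction
      · -- source: A restarts at n+1; B pops this source off the list
        rw [if_pos hsrc]
        rw [srcs_cons direction ds j hj, if_pos hsrc, List.foldl_cons]
        have hnw : walkB direction ds (if direction = "R" then 1 else -1) j f fs = fs := by
          rw [walkB, dif_neg]
          rintro ⟨_, _, h3⟩; exact h3 hsrc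
        have hstep : (if f = 0 then fs else walkB direction ds (if direction = "R" then 1 else -1) j f fs) = fs := by
          by_cases h0 : f = 0 <;> simp [h0, hnw]
        rw [hstep]
        rw [delta_eq_sign_mul]
        rw [ih (j + 1) ((ds.length : Int) + 1) _ (by omega) (by simpa using hlen)
            (by right; push_cast; omega)]
        rw [if_neg (by omega : ¬ ((ds.length : Int) + 1 = 0))]
        rfl
      · by_cases hblk : ds.getD j ' ' = '.'
        · -- free '.' cell, not a source
          have hcnd : j < ds.length ∧ ds.getD j ' ' = '.' ∧ String.mk [ds.getD j ' '] ≠ direction :=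
            ⟨hj, hblk, hsrc⟩
          have hno2 : ¬ (String.mk [ds.getD j ' '] ≠ direction ∧ ds.getD j ' ' ≠ '.') := by
            rintro ⟨_, h2⟩; exact h2 hblk
          rw [if_neg hsrc, if_neg hno2]
          by_cases h0 : f = 0
          · -- dormant: force stays 0, cell written with +0
            subst h0
            rw [if_neg (by simp : ¬ ((0 : Int) ≠ 0))]
            have hset : fs.set j (fs.getD j 0 + (if direction = "R" then (0 : Int) else -0)) = fs := by
              have hz : (if direction = "R" then (0 : Int) else -0) = 0 := by
                by_cases h : direction = "R" <;> simp [h]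
              rw [hz]; exact set_getD_self fs j (by omega)
            rw [hset]
            rw [srcs_cons direction ds j hj, if_neg hsrc]
            rw [ih (j + 1) 0 fs (by omega) hlen (Or.inl rfl)]
            simp
          · -- active: A writes f-1 here; B's walk takes one step
            have hfpos : (ds.length : Int) - j < f := by
              rcases hf with h | h
              · exact absurd h h0
              · exact h
            rw [if_pos h0]
            rw [srcs_cons direction ds j hj, if_neg hsrc, if_neg h0]
            conv_rhs => rw [walkB, dif_pos hcnd]
            rw [delta_eq_sign_mul]
            rw [ih (j + 1) (f - 1) _ (by omega) (by simpa using hlen)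
                (by right; push_cast; omega)]
            rw [if_neg (by omega : ¬ (f - 1 = 0))]
        · -- blocker: A resets force to 0 and adds 0; B skips the cell entirely
          rw [if_neg hsrc, if_pos ⟨hsrc, hblk⟩]
          have hset : fs.set j (fs.getD j 0 + (if direction = "R" then (0 : Int) else -0)) = fs := by
            have hz : (if direction = "R" then (0 : Int) else -0) = 0 := by
              by_cases h : direction = "R" <;> simp [h]
            rw [hz]; exact set_getD_self fs j (by omega)
          rw [hset]
          rw [srcs_cons direction ds j hj, if_neg hsrc]
          have hnw : walkB direction ds (if direction = "R" then 1 else -1) j f fs = fs := by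
            rw [walkB, dif_neg]
            rintro ⟨_, h2, _⟩; exact hblk h2
          have hstep : (if f = 0 then fs else walkB direction ds (if direction = "R" then 1 else -1) j f fs) = fs := by
            by_cases h0 : f = 0 <;> simp [h0, hnw]
          rw [hstep]
          rw [ih (j + 1) 0 fs (by omega) hlen (Or.inl rfl)]
          simp

-- ===== VERDICT (by name: the statement is the Claim_ definition above) =====
theorem determineForces_spec : Claim_equal_determineForces := by
  intro direction dominoes forces _ hpre
  unfold Spec_determineForces determineForces determineForces_alt
  rw [loopA_eq_fold direction dominoes.toList (dominoes.toList.length) 0 0 forces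
      (by omega) hpre (Or.inl rfl)]
  simp [srcs_zero]
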